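-- pv_equiv track=rewrite | github.com/atiwarigit/agentgrand | packages/ai/main.py | _extract_outcomes_from_project
-- ===== SOURCE A (Python) =====
-- def _extract_outcomes_from_project(project_content: str) -> str:
--     """Extract outcomes section from project plan content"""
--     # Simple extraction - in production you might use more sophisticated parsing
--     if "outcomes" in project_content.lower() or "results" in project_content.lower():
--         lines = project_content.split('\n')
--         outcomes_lines = []
--         in_outcomes = False
--
--         for line in lines:
--             if any(word in line.lower() for word in ['outcome', 'result', 'impact', 'goal']):
--                 in_outcomes = True
--             if in_outcomes:
--                 outcomes_lines.append(line)
--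
--         if outcomes_lines:
--             return '\n'.join(outcomes_lines)
--
--     return "Expected outcomes and impact will be defined based on the project plan and community needs identified."
-- ===== SOURCE B (Python) =====
-- _DEFAULT = "Expected outcomes and impact will be defined based on the project plan and community needs identified."
--
-- _KEYWORDS = ('outcome', 'result', 'impact', 'goal')
--
--
-- def _extract_outcomes_from_project(project_content: str) -> str:
--     """Extract outcomes section from project plan content.
--
--     Works by character-position arithmetic instead of scanning lines: locate the
--     earliest keyword occurrence in the lowercased text, back up to the start of
--     the line containing it, and return the raw suffix of the original string.
--     """
--     low = project_content.lower()
--     if "outcomes" in low or "results" in low: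
--         hits = [p for p in (low.find(k) for k in _KEYWORDS) if p != -1]
--         if hits:
--             start = low.rfind('\n', 0, min(hits)) + 1
--             return project_content[start:]
--     return _DEFAULT
-- ===== Notes on version B (the rewrite author's own statement) =====
-- stated objective: alternative
-- what changed: Replaces A's split-into-lines sticky-flag scan that accumulates every remaining line with character-position arithmetic: find the earliest keyword occurrence in the lowercased text, rfind the preceding newline, and return the raw suffix of the original string; no line list is ever built.
import Mathlib
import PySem

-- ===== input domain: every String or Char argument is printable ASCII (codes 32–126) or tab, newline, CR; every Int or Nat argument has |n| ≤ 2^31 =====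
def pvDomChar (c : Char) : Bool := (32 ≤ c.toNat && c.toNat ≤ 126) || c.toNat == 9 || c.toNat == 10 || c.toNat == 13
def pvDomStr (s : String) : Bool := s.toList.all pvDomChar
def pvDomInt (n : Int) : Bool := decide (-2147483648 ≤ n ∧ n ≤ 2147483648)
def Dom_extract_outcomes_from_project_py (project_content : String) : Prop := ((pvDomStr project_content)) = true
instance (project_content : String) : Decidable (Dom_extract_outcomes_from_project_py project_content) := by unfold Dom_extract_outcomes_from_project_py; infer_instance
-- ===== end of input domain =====

-- B replaces A's split-into-lines sticky-flag accumulator with character-position arithmetic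
-- (earliest keyword occurrence, rfind of the preceding newline, raw suffix); objective: alternative.


def pvDefaultMsg : String :=
  "Expected outcomes and impact will be defined based on the project plan and community needs identified."

-- ===== PORT A =====
-- any(word in line.lower() for word in ['outcome', 'result', 'impact', 'goal'])
def pvHitA (line : String) : Bool :=
  ["outcome", "result", "impact", "goal"].any (fun word => PySem.Str.isIn word (PySem.Str.lower line))

-- one iteration of A's for-loop over state (outcomes_lines, in_outcomes)
def pvStepA (st : List String × Bool) (line : String) : List String × Bool :=
  let in_outcomes := if pvHitA line then true else st.2
  (if in_outcomes then st.1 ++ [line] else st.1, in_outcomes)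

def extract_outcomes_from_project_py (project_content : String) : String :=
  if PySem.Str.isIn "outcomes" (PySem.Str.lower project_content)
      || PySem.Str.isIn "results" (PySem.Str.lower project_content) then
    -- split('\n'): sep ≠ "" so split? is always some
    let lines := (PySem.Str.split? project_content "\n").getD []
    let st := lines.foldl pvStepA ([], false)
    if st.1 ≠ [] then PySem.Str.join "\n" st.1 else pvDefaultMsg
  else pvDefaultMsg

-- ===== PORT B =====
def pvKeywords : List String := ["outcome", "result", "impact", "goal"]

def extract_outcomes_from_project_py_alt (project_content : String) : String :=
  let low := PySem.Str.lower project_content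
  if PySem.Str.isIn "outcomes" low || PySem.Str.isIn "results" low then
    -- hits = [p for p in (low.find(k) for k in _KEYWORDS) if p != -1]
    let hits := (pvKeywords.map (fun k => PySem.Str.find low k)).filter (fun p => p ≠ -1)
    -- 'if hits: start = low.rfind('\n', 0, min(hits)) + 1; return project_content[start:]'
    match PySem.List.min? hits id with
    | some m =>
        PySem.Str.slice project_content (some (PySem.Str.rfindFrom low "\n" 0 (some m) + 1)) none
    | none => pvDefaultMsg
  else pvDefaultMsg

-- ===== PRECONDITION & SPEC =====
def Spec_extract_outcomes_from_project_py (project_content : String) (out : String) : Prop := out = extract_outcomes_from_project_py_alt project_content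
instance (project_content : String) (out : String) : Decidable (Spec_extract_outcomes_from_project_py project_content out) := by unfold Spec_extract_outcomes_from_project_py; infer_instance

-- ===== CLAIM =====
def Claim_equal_extract_outcomes_from_project_py : Prop := ∀ (project_content : String), Dom_extract_outcomes_from_project_py project_content → Spec_extract_outcomes_from_project_py project_content (extract_outcomes_from_project_py project_content)

-- ===== LEMMAS AND PROOFS =====

-- ---- proof-side definitions (List Char level) ----

def pvNl : List Char := ['\n']

def pvKwC : List (List Char) := pvKeywords.map String.toList

-- A's line test, on the character level
def pvHitC (l : List Char) : Bool := pvKwC.any (fun k => PySem.Chars.isIn k (PySem.Chars.lower l))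

-- A's loop result: first keyword line together with everything after it
def pvFindRestC : List (List Char) → Option (List (List Char))
  | [] => none
  | l :: ls => if pvHitC l then some (l :: ls) else pvFindRestC ls

-- A's loop on String lines (first keyword line with the rest)
def pvFindRestS : List String → Option (List String)
  | [] => none
  | l :: ls => if pvHitA l then some (l :: ls) else pvFindRestS ls

-- B's minimum keyword position
def pvMinHit (L : List Char) : Option Int :=
  PySem.List.min? ((pvKwC.map (fun k => PySem.Chars.find L k)).filter (fun p => p ≠ -1)) id

-- abstract values of the two computations inside the guard, as Options (none = fall through)
def pvAOutC (S : List Char) : Option (List Char) :=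
  (pvFindRestC (PySem.Chars.splitOn S pvNl)).map (PySem.Chars.join pvNl)

def pvBOutC (S : List Char) : Option (List Char) :=
  match pvMinHit (PySem.Chars.lower S) with
  | some m => some (S.drop (PySem.Chars.rfind ((PySem.Chars.lower S).take m.toNat) pvNl + 1).toNat)
  | none => none

-- ---- A-side loop characterisation ----

theorem pvFoldlA_true (lines : List String) (acc : List String) :
    lines.foldl pvStepA (acc, true) = (acc ++ lines, true) := by
  induction lines generalizing acc with
  | nil => simp
  | cons l ls ih =>
    rw [List.foldl_cons, show pvStepA (acc, true) l = (acc ++ [l], true) by simp [pvStepA], ih]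
    simp

theorem pvFoldlA_false (lines : List String) (acc : List String) :
    lines.foldl pvStepA (acc, false)
      = match pvFindRestS lines with
        | some suffix => (acc ++ suffix, true)
        | none => (acc, false) := by
  induction lines generalizing acc with
  | nil => simp [pvFindRestS]
  | cons l ls ih =>
    by_cases h : pvHitA l
    · rw [List.foldl_cons,
        show pvStepA (acc, false) l = (acc ++ [l], true) by simp [pvStepA, h],
        pvFoldlA_true]
      simp [pvFindRestS, h]
    · rw [List.foldl_cons,
        show pvStepA (acc, false) l = (acc, false) by simp [pvStepA, h],
        ih]
      simp [pvFindRestS, h]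

-- ---- basic character facts ----

theorem pvLowerChar_nl (c : Char) : (PySem.Chars.lowerChar c = '\n') ↔ c = '\n' := by
  unfold PySem.Chars.lowerChar PySem.Chars.isupper
  split_ifs with hup
  · simp only [Bool.and_eq_true, decide_eq_true_eq] at hup
    constructor
    · intro h
      exfalso
      have h10 : (Char.ofNat (c.toNat + 32)).toNat = 10 := by rw [h]; rfl
      rw [Char.toNat_ofNat] at h10
      split at h10 <;> omega
    · intro h
      subst h
      exact absurd hup.1 (by decide)
  · exact Iff.rfl

theorem pvMemLower (S : List Char) : ('\n' ∈ PySem.Chars.lower S) ↔ '\n' ∈ S := by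
  simp [PySem.Chars.lower, List.mem_map]
  constructor
  · rintro ⟨a, ha, h⟩; rwa [(pvLowerChar_nl a).mp h] at ha
  · intro h; exact ⟨'\n', h, (pvLowerChar_nl '\n').mpr rfl⟩

theorem pvLower_append (X Y : List Char) :
    PySem.Chars.lower (X ++ Y) = PySem.Chars.lower X ++ PySem.Chars.lower Y := by
  simp [PySem.Chars.lower]

theorem pvLower_cons_nl (T : List Char) :
    PySem.Chars.lower ('\n' :: T) = '\n' :: PySem.Chars.lower T := by
  simp [PySem.Chars.lower]
  rfl

theorem pvLower_length (X : List Char) : (PySem.Chars.lower X).length = X.length := by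
  simp [PySem.Chars.lower]

-- ['\n'] is a prefix iff the head is a newline
theorem pvPrefNl (l : List Char) : (pvNl.isPrefixOf l = true) ↔ l.head? = some '\n' := by
  cases l with
  | nil => simp [pvNl]
  | cons c cs =>
    simp only [pvNl, List.head?_cons, Option.some.injEq]
    simp [List.isPrefixOf]
    exact eq_comm

theorem pvFirstSplit (S : List Char) (h : '\n' ∈ S) :
    ∃ H T, S = H ++ '\n' :: T ∧ '\n' ∉ H := by
  induction S with
  | nil => simp at h
  | cons a l ih =>
    by_cases ha : a = '\n'
    · exact ⟨[], l, by simp [ha], by simp⟩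
    · obtain ⟨H, T, heq, hH⟩ := ih (by
        rcases List.mem_cons.mp h with h | h
        · exact absurd h.symm ha
        · exact h)
      refine ⟨a :: H, T, by rw [List.cons_append, heq], ?_⟩
      intro hmem
      rcases List.mem_cons.mp hmem with h' | h'
      · exact ha h'.symm
      · exact hH h'

-- ---- splitOn characterisation ----

theorem pvGo0 (l cur : List Char) (acc : List (List Char)) :
    PySem.Chars.splitOn.go pvNl 0 l cur acc = ((cur.reverse ++ l) :: acc).reverse := by
  rw [PySem.Chars.splitOn.go]

theorem pvGoNil (f : Nat) (cur : List Char) (acc : List (List Char)) :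
    PySem.Chars.splitOn.go pvNl (f+1) [] cur acc = (cur.reverse :: acc).reverse := by
  rw [PySem.Chars.splitOn.go]
  exact fun h => absurd h (Nat.succ_ne_zero f)

theorem pvGoStep (f : Nat) (c : Char) (rest cur : List Char) (acc : List (List Char)) :
    PySem.Chars.splitOn.go pvNl (f+1) (c :: rest) cur acc
      = if pvNl.isPrefixOf (c :: rest)
          then PySem.Chars.splitOn.go pvNl f rest [] (cur.reverse :: acc)
          else PySem.Chars.splitOn.go pvNl f rest (c :: cur) acc := by
  rw [PySem.Chars.splitOn.go]
  simp [pvNl]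

theorem pvGoAcc (fuel : Nat) : ∀ (l cur : List Char) (acc : List (List Char)),
    PySem.Chars.splitOn.go pvNl fuel l cur acc
      = acc.reverse ++ PySem.Chars.splitOn.go pvNl fuel l cur [] := by
  induction fuel with
  | zero => intro l cur acc; rw [pvGo0, pvGo0]; simp
  | succ f ih =>
    intro l cur acc
    cases l with
    | nil => rw [pvGoNil, pvGoNil]; simp
    | cons c rest =>
      rw [pvGoStep, pvGoStep]
      by_cases hp : pvNl.isPrefixOf (c :: rest)
      · rw [if_pos hp, if_pos hp, ih rest [] (cur.reverse :: acc), ih rest [] (cur.reverse :: [])]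
        simp
      · rw [if_neg hp, if_neg hp, ih rest (c :: cur) acc]

theorem pvGoNoSep (fuel : Nat) : ∀ (l cur : List Char) (acc : List (List Char)),
    '\n' ∉ l → l.length ≤ fuel →
    PySem.Chars.splitOn.go pvNl fuel l cur acc = ((cur.reverse ++ l) :: acc).reverse := by
  induction fuel with
  | zero => intro l cur acc _ _; exact pvGo0 l cur acc
  | succ f ih =>
    intro l cur acc h hf
    cases l with
    | nil => rw [pvGoNil]; simp
    | cons c rest =>
      have hc : c ≠ '\n' := fun hc => h (by simp [hc])
      have hp : ¬ (pvNl.isPrefixOf (c :: rest) = true) := by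
        rw [pvPrefNl]
        simp
        exact hc
      rw [pvGoStep, if_neg hp,
        ih rest (c :: cur) acc (fun h' => h (List.mem_cons_of_mem _ h'))
          (by rw [List.length_cons] at hf; omega)]
      simp

theorem pvSplitOn_noNl (S : List Char) (h : '\n' ∉ S) :
    PySem.Chars.splitOn S pvNl = [S] := by
  rw [PySem.Chars.splitOn, pvGoNoSep (S.length + 1) S [] [] h (by omega)]
  simp

theorem pvGoCons : ∀ (H : List Char) (fuel : Nat) (T cur : List Char) (acc : List (List Char)),
    '\n' ∉ H → H.length + 1 ≤ fuel →
    PySem.Chars.splitOn.go pvNl fuel (H ++ '\n' :: T) cur acc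
      = PySem.Chars.splitOn.go pvNl (fuel - (H.length + 1)) T [] ((cur.reverse ++ H) :: acc) := by
  intro H
  induction H with
  | nil =>
    intro fuel T cur acc _ hf
    cases fuel with
    | zero => omega
    | succ f =>
      have hp : pvNl.isPrefixOf ('\n' :: T) = true := by rw [pvPrefNl]; simp
      simp only [List.nil_append, List.length_nil]
      rw [pvGoStep, if_pos hp]
      simp
  | cons c H' ih =>
    intro fuel T cur acc hH hf
    cases fuel with
    | zero => simp at hf
    | succ f =>
      have hc : c ≠ '\n' := fun hc => hH (by simp [hc])
      have hp : ¬ (pvNl.isPrefixOf (c :: (H' ++ '\n' :: T)) = true) := by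
        rw [pvPrefNl]
        simp
        exact hc
      have hH' : '\n' ∉ H' := fun h' => hH (List.mem_cons_of_mem _ h')
      rw [List.cons_append, pvGoStep, if_neg hp,
        ih f T (c :: cur) acc hH' (by rw [List.length_cons] at hf; omega)]
      simp only [List.reverse_cons, List.length_cons]
      have harith : f - (H'.length + 1) = f + 1 - (H'.length + 1 + 1) := by omega
      rw [harith]
      congr 2
      simp

theorem pvSplitOn_cons (H T : List Char) (hH : '\n' ∉ H) :
    PySem.Chars.splitOn (H ++ '\n' :: T) pvNl = H :: PySem.Chars.splitOn T pvNl := by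
  rw [PySem.Chars.splitOn,
    pvGoCons H ((H ++ '\n' :: T).length + 1) T [] [] hH (by simp)]
  have hlen : (H ++ '\n' :: T).length + 1 - (H.length + 1) = T.length + 1 := by simp
  rw [hlen, pvGoAcc]
  simp [PySem.Chars.splitOn]

theorem pvSplitOn_ne_nil (S : List Char) : PySem.Chars.splitOn S pvNl ≠ [] := by
  by_cases h : '\n' ∈ S
  · obtain ⟨H, T, rfl, hH⟩ := pvFirstSplit S h
    rw [pvSplitOn_cons H T hH]
    simp
  · rw [pvSplitOn_noNl S h]
    simp


theorem pvJoinSplitAux : ∀ (n : Nat) (S : List Char), S.length ≤ n →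
    PySem.Chars.join pvNl (PySem.Chars.splitOn S pvNl) = S := by
  intro n
  induction n with
  | zero =>
    intro S hlen
    have : S = [] := List.eq_nil_of_length_eq_zero (by omega)
    subst this
    rw [pvSplitOn_noNl [] (by simp), PySem.Chars.join_singleton]
  | succ n ih =>
    intro S hlen
    by_cases h : '\n' ∈ S
    · obtain ⟨H, T, rfl, hH⟩ := pvFirstSplit S h
      rw [pvSplitOn_cons H T hH]
      cases hsp : PySem.Chars.splitOn T pvNl with
      | nil => exact absurd hsp (pvSplitOn_ne_nil T)
      | cons l0 ls =>
        have hT := ih T (by simp at hlen; omega)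
        rw [hsp] at hT
        rw [PySem.Chars.join_cons_cons, hT]
        simp [pvNl]
    · rw [pvSplitOn_noNl S h, PySem.Chars.join_singleton]

theorem pvJoinSplit (S : List Char) : PySem.Chars.join pvNl (PySem.Chars.splitOn S pvNl) = S :=
  pvJoinSplitAux S.length S le_rfl

-- ---- rfind characterisation ----

theorem pvRGo0 (S : List Char) :
    PySem.Chars.rfind.go S pvNl 0 = if pvNl.isPrefixOf S then (0 : Int) else -1 := by
  rw [PySem.Chars.rfind.go]

theorem pvRGoSucc (S : List Char) (j : Nat) :
    PySem.Chars.rfind.go S pvNl (j+1)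
      = if pvNl.isPrefixOf (S.drop (j+1)) then ((j+1 : Nat) : Int) else PySem.Chars.rfind.go S pvNl j := by
  rw [PySem.Chars.rfind.go]

theorem pvRfindGo_ge (S : List Char) (j : Nat) : -1 ≤ PySem.Chars.rfind.go S pvNl j := by
  induction j with
  | zero =>
    rw [pvRGo0]
    split <;> omega
  | succ j ih =>
    rw [pvRGoSucc]
    split
    · omega
    · exact ih

theorem pvRfind_ge (S : List Char) : -1 ≤ PySem.Chars.rfind S pvNl := by
  rw [PySem.Chars.rfind]
  exact pvRfindGo_ge S S.length

theorem pvRfindGo_none (S : List Char) (j : Nat)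
    (h : ∀ i, i ≤ j → S[i]? ≠ some '\n') : PySem.Chars.rfind.go S pvNl j = -1 := by
  induction j with
  | zero =>
    rw [pvRGo0, if_neg]
    rw [pvPrefNl]
    have := h 0 (le_refl 0)
    rwa [← List.head?_eq_getElem?] at this
  | succ j ih =>
    rw [pvRGoSucc, if_neg]
    · exact ih (fun i hi => h i (by omega))
    · rw [pvPrefNl, List.head?_drop]
      exact h (j+1) (le_refl _)

theorem pvRfind_no (S : List Char) (h : '\n' ∉ S) : PySem.Chars.rfind S pvNl = -1 := by
  rw [PySem.Chars.rfind]
  exact pvRfindGo_none S S.length (fun i _ hi => h (List.mem_of_getElem? hi))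

theorem pvRfindGo_found (S : List Char) (j j' : Nat)
    (hj' : S[j']? = some '\n') (hafter : ∀ i, j' < i → i ≤ j → S[i]? ≠ some '\n')
    (hle : j' ≤ j) : PySem.Chars.rfind.go S pvNl j = (j' : Int) := by
  induction j with
  | zero =>
    have h0 : j' = 0 := by omega
    subst h0
    have hp : pvNl.isPrefixOf S = true := by
      rw [pvPrefNl, List.head?_eq_getElem?]
      exact hj'
    rw [pvRGo0, if_pos hp]
    simp
  | succ j ih =>
    by_cases hj : j' = j + 1
    · subst hj
      rw [pvRGoSucc, if_pos]
      rw [pvPrefNl, List.head?_drop]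
      exact hj'
    · rw [pvRGoSucc, if_neg]
      · exact ih (fun i hi1 hi2 => hafter i hi1 (by omega)) (by omega)
      · rw [pvPrefNl, List.head?_drop]
        exact hafter (j+1) (by omega) (le_refl _)

theorem pvLastSplit (Z : List Char) (h : '\n' ∈ Z) :
    ∃ Z1 Z2, Z = Z1 ++ '\n' :: Z2 ∧ '\n' ∉ Z2 := by
  obtain ⟨H, T, hrev, hH⟩ := pvFirstSplit Z.reverse (by rwa [List.mem_reverse])
  refine ⟨T.reverse, H.reverse, ?_, by rwa [List.mem_reverse]⟩
  have hz : Z = (H ++ '\n' :: T).reverse := by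
    have h2 := congrArg List.reverse hrev
    rwa [List.reverse_reverse] at h2
  rw [hz]
  simp

theorem pvGetCat (X Z : List Char) (i : Nat) :
    (X ++ '\n' :: Z)[i]? = if i < X.length then X[i]?
      else if i = X.length then some '\n' else Z[i - X.length - 1]? := by
  rcases Nat.lt_trichotomy i X.length with h | h | h
  · rw [List.getElem?_append_left h, if_pos h]
  · subst h
    rw [List.getElem?_append_right (le_refl _)]
    simp
  · rw [List.getElem?_append_right (by omega), if_neg (by omega), if_neg (by omega)]
    have h2 : i - X.length = (i - X.length - 1) + 1 := by omega
    rw [h2, List.getElem?_cons_succ]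
    congr 1

theorem pvRfind_append (X Z : List Char) (_hX : '\n' ∉ X) :
    PySem.Chars.rfind (X ++ '\n' :: Z) pvNl = (X.length : Int) + 1 + PySem.Chars.rfind Z pvNl := by
  by_cases hz : '\n' ∈ Z
  · obtain ⟨Z1, Z2, rfl, hZ2⟩ := pvLastSplit Z hz
    have hrz : PySem.Chars.rfind (Z1 ++ '\n' :: Z2) pvNl = (Z1.length : Int) := by
      rw [PySem.Chars.rfind]
      apply pvRfindGo_found _ _ Z1.length
      · rw [pvGetCat]; simp
      · intro i hi1 _
        rw [pvGetCat, if_neg (by omega), if_neg (by omega)]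
        intro hmem
        exact hZ2 (List.mem_of_getElem? hmem)
      · simp
    rw [hrz, PySem.Chars.rfind]
    have hfound : PySem.Chars.rfind.go (X ++ '\n' :: (Z1 ++ '\n' :: Z2)) pvNl
        (X ++ '\n' :: (Z1 ++ '\n' :: Z2)).length = ((X.length + 1 + Z1.length : Nat) : Int) := by
      apply pvRfindGo_found _ _ (X.length + 1 + Z1.length)
      · rw [pvGetCat, if_neg (by omega), if_neg (by omega)]
        have : X.length + 1 + Z1.length - X.length - 1 = Z1.length := by omega
        rw [this, pvGetCat]
        simp
      · intro i hi1 _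
        rw [pvGetCat, if_neg (by omega), if_neg (by omega), pvGetCat,
          if_neg (by omega), if_neg (by omega)]
        intro hmem
        exact hZ2 (List.mem_of_getElem? hmem)
      · simp
        omega
    rw [hfound]
    push_cast
    ring
  · rw [pvRfind_no Z hz, PySem.Chars.rfind]
    have hfound : PySem.Chars.rfind.go (X ++ '\n' :: Z) pvNl (X ++ '\n' :: Z).length
        = ((X.length : Nat) : Int) := by
      apply pvRfindGo_found _ _ X.length
      · rw [pvGetCat]; simp
      · intro i hi1 _
        rw [pvGetCat, if_neg (by omega), if_neg (by omega)]
        intro hmem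
        exact hz (List.mem_of_getElem? hmem)
      · simp
    rw [hfound]
    omega

-- ---- find characterisation ----

theorem pvFindUnique (S k : List Char) (j : Nat)
    (hpre : k <+: S.drop j) (hmin : ∀ i, i < j → ¬ k <+: S.drop i) :
    PySem.Chars.find S k = (j : Int) := by
  have hin : k <:+: S := hpre.isInfix.trans (List.drop_suffix j S).isInfix
  have h0 : 0 ≤ PySem.Chars.find S k := (PySem.Chars.find_nonneg_iff S k).mpr hin
  obtain ⟨hp, hm⟩ := PySem.Chars.find_spec h0
  rcases Nat.lt_trichotomy (PySem.Chars.find S k).toNat j with h | h | h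
  · exact absurd hp (hmin _ h)
  · omega
  · exact absurd hpre (hm j h)

-- an occurrence in X ++ '\n' :: Z of a newline-free word lies in X or in Z
theorem pvOccL (X Z k : List Char) (i : Nat) (hk : '\n' ∉ k)
    (h : k <+: (X ++ '\n' :: Z).drop i) (hi : i ≤ X.length) : k <+: X.drop i := by
  rw [List.drop_append, Nat.sub_eq_zero_of_le hi, List.drop_zero] at h
  by_cases hlen : k.length ≤ (X.drop i).length
  · have hk2 := List.prefix_iff_eq_take.mp h
    rw [List.take_append, Nat.sub_eq_zero_of_le hlen, List.take_zero, List.append_nil] at hk2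
    rw [hk2]
    exact List.take_prefix _ _
  · exfalso
    apply hk
    have hk2 := List.prefix_iff_eq_take.mp h
    have hnl : k[(X.drop i).length]? = some '\n' := by
      rw [hk2, List.getElem?_take, if_pos (by omega), List.getElem?_append_right (le_refl _)]
      simp
    exact List.mem_of_getElem? hnl

theorem pvDropR (X Z : List Char) (i : Nat) (hi : X.length < i) :
    (X ++ '\n' :: Z).drop i = Z.drop (i - X.length - 1) := by
  rw [List.drop_append]
  have h1 : X.drop i = [] := List.drop_eq_nil_of_le (by omega)
  have h2 : i - X.length = (i - X.length - 1) + 1 := by omega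
  rw [h1, h2, List.drop_succ_cons, List.nil_append]
  congr 1

theorem pvFindShift (X Z k : List Char) (hk : '\n' ∉ k) (_hne : k ≠ []) (hX : ¬ k <:+: X) :
    PySem.Chars.find (X ++ '\n' :: Z) k
      = if PySem.Chars.find Z k = -1 then -1 else (X.length : Int) + 1 + PySem.Chars.find Z k := by
  by_cases hz : PySem.Chars.find Z k = -1
  · rw [if_pos hz, PySem.Chars.find_eq_neg_one_iff]
    intro hinf
    obtain ⟨i, hpre⟩ := (PySem.Chars.exists_prefix_drop_iff_isIn k _).mpr
      ((PySem.Chars.isIn_iff_infix k _).mpr hinf)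
    by_cases hile : i ≤ X.length
    · exact hX ((pvOccL X Z k i hk hpre hile).isInfix.trans (List.drop_suffix i X).isInfix)
    · rw [pvDropR X Z i (by omega)] at hpre
      exact (PySem.Chars.find_eq_neg_one_iff Z k).mp hz
        (hpre.isInfix.trans (List.drop_suffix _ Z).isInfix)
  · rw [if_neg hz]
    have h0 : 0 ≤ PySem.Chars.find Z k := by
      have := PySem.Chars.neg_one_le_find Z k
      omega
    obtain ⟨hp, hm⟩ := PySem.Chars.find_spec h0
    have hju : PySem.Chars.find (X ++ '\n' :: Z) k
        = ((X.length + 1 + (PySem.Chars.find Z k).toNat : Nat) : Int) := by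
      apply pvFindUnique
      · rw [pvDropR X Z _ (by omega)]
        have harith : X.length + 1 + (PySem.Chars.find Z k).toNat - X.length - 1
            = (PySem.Chars.find Z k).toNat := by omega
        rw [harith]
        exact hp
      · intro i hi hpre
        by_cases hile : i ≤ X.length
        · exact hX ((pvOccL X Z k i hk hpre hile).isInfix.trans (List.drop_suffix i X).isInfix)
        · rw [pvDropR X Z i (by omega)] at hpre
          exact hm (i - X.length - 1) (by omega) hpre
    rw [hju]
    push_cast
    omega

theorem pvFind_lt_of_infix (X R k : List Char) (hne : k ≠ []) (hin : k <:+: X) :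
    0 ≤ PySem.Chars.find (X ++ R) k ∧ PySem.Chars.find (X ++ R) k < (X.length : Int) := by
  obtain ⟨a, t, rfl⟩ := hin
  have hform : ((a ++ k ++ t) ++ R) = a ++ (k ++ (t ++ R)) := by simp
  have hocc : k <+: ((a ++ k ++ t) ++ R).drop a.length := by
    rw [hform, List.drop_left' rfl]
    exact ⟨t ++ R, by simp⟩
  have h0 : 0 ≤ PySem.Chars.find ((a ++ k ++ t) ++ R) k :=
    (PySem.Chars.find_nonneg_iff _ k).mpr
      (hocc.isInfix.trans (List.drop_suffix _ _).isInfix)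
  obtain ⟨_, hm⟩ := PySem.Chars.find_spec h0
  refine ⟨h0, ?_⟩
  have hle : (PySem.Chars.find ((a ++ k ++ t) ++ R) k).toNat ≤ a.length := by
    by_contra hlt
    exact hm a.length (by omega) hocc
  have hklen : 0 < k.length := List.length_pos_of_ne_nil hne
  simp only [List.length_append]
  omega

-- ---- min? facts ----

def pvStep (acc : Option Int) (x : Int) : Option Int :=
  match acc with | none => some x | some m => if x < m then some x else some m

theorem pvMin?_eq_foldl (xs : List Int) : PySem.List.min? xs id = xs.foldl pvStep none := by
  unfold PySem.List.min?
  congr 1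
  funext acc x
  cases acc <;> simp [pvStep]

theorem pvFoldlStep_ne_none (xs : List Int) (m : Int) : xs.foldl pvStep (some m) ≠ none := by
  induction xs generalizing m with
  | nil => simp
  | cons x xs ih => simp only [List.foldl_cons, pvStep]; split <;> apply ih

theorem pvMin?_none_iff (xs : List Int) : PySem.List.min? xs id = none ↔ xs = [] := by
  rw [pvMin?_eq_foldl]
  cases xs with
  | nil => simp
  | cons x xs =>
    simp only [List.foldl_cons, pvStep]
    exact ⟨fun h => absurd h (pvFoldlStep_ne_none xs x), by simp⟩

theorem pvFoldlStep_mem (xs : List Int) (m r : Int) (h : xs.foldl pvStep (some m) = some r) :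
    r = m ∨ r ∈ xs := by
  induction xs generalizing m with
  | nil => simp at h; exact Or.inl h.symm
  | cons x xs ih =>
    simp only [List.foldl_cons, pvStep] at h
    split at h
    · rcases ih _ h with h' | h'
      · exact Or.inr (by simp [h'])
      · exact Or.inr (List.mem_cons_of_mem _ h')
    · rcases ih _ h with h' | h'
      · exact Or.inl h'
      · exact Or.inr (List.mem_cons_of_mem _ h')

theorem pvMin?_mem (xs : List Int) (m : Int) (h : PySem.List.min? xs id = some m) : m ∈ xs := by
  rw [pvMin?_eq_foldl] at h
  cases xs with
  | nil => simp at h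
  | cons x xs =>
    simp only [List.foldl_cons, pvStep] at h
    rcases pvFoldlStep_mem xs x m h with h' | h'
    · simp [h']
    · exact List.mem_cons_of_mem _ h'

-- ---- shift lemmas for B's hit list ----

theorem pvHits_shift (ks : List (List Char)) (L Y : List Char) (c : Int) (hc : 0 ≤ c)
    (hsh : ∀ k ∈ ks, PySem.Chars.find L k
        = if PySem.Chars.find Y k = -1 then -1 else c + PySem.Chars.find Y k) :
    ((ks.map (fun k => PySem.Chars.find L k)).filter (fun p => p ≠ -1))
      = ((ks.map (fun k => PySem.Chars.find Y k)).filter (fun p => p ≠ -1)).map (fun p => c + p) := by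
  induction ks with
  | nil => simp
  | cons k ks ih =>
    have hk := hsh k (List.mem_cons_self ..)
    have ihr := ih (fun k' hk' => hsh k' (List.mem_cons_of_mem _ hk'))
    simp only [List.map_cons, List.filter_cons]
    by_cases hy : PySem.Chars.find Y k = -1
    · rw [hk, if_pos hy]
      simp only [hy]
      simpa using ihr
    · have hy0 : 0 ≤ PySem.Chars.find Y k := by
        have := PySem.Chars.neg_one_le_find Y k
        omega
      rw [hk, if_neg hy]
      have hne : (c + PySem.Chars.find Y k) ≠ -1 := by omega
      simp only [decide_not] at ihr
      simp [hne, hy, ihr]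

theorem pvMin?_map_add (c : Int) (xs : List Int) :
    PySem.List.min? (xs.map (fun p => c + p)) id = (PySem.List.min? xs id).map (fun p => c + p) := by
  rw [pvMin?_eq_foldl, pvMin?_eq_foldl]
  suffices h : ∀ (acc : Option Int),
      (xs.map (fun p => c + p)).foldl pvStep (acc.map (fun p => c + p))
        = (xs.foldl pvStep acc).map (fun p => c + p) from h none
  induction xs with
  | nil => intro acc; simp
  | cons x xs ih =>
    intro acc
    simp only [List.map_cons, List.foldl_cons]
    have hstep : pvStep (acc.map (fun p => c + p)) (c + x) = (pvStep acc x).map (fun p => c + p) := by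
      cases acc with
      | none => simp [pvStep]
      | some m =>
        simp only [pvStep, Option.map_some]
        split_ifs with h1 h2 h2 <;> first | rfl | omega
    rw [hstep, ih]

theorem pvHits_nonneg (ks : List (List Char)) (L : List Char) (m : Int)
    (h : m ∈ (ks.map (fun k => PySem.Chars.find L k)).filter (fun p => p ≠ -1)) : 0 ≤ m := by
  rcases List.mem_filter.mp h with ⟨hmem, hne⟩
  rcases List.mem_map.mp hmem with ⟨k, _, rfl⟩
  have := PySem.Chars.neg_one_le_find L k
  simp at hne
  omega

theorem pvHits_le_len (ks : List (List Char)) (L : List Char) (m : Int)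
    (h : m ∈ (ks.map (fun k => PySem.Chars.find L k)).filter (fun p => p ≠ -1)) :
    m ≤ (L.length : Int) := by
  rcases List.mem_filter.mp h with ⟨hmem, _⟩
  rcases List.mem_map.mp hmem with ⟨k, _, rfl⟩
  exact PySem.Chars.find_le_length L k

-- keywords are nonempty and newline-free
theorem pvKwC_fact : ∀ k ∈ pvKwC, k ≠ [] ∧ '\n' ∉ k := by decide

-- ---- MAIN: the two in-guard computations agree ----

theorem pvMinHit_some (L : List Char) (k : List Char) (hkmem : k ∈ pvKwC)
    (hkne : PySem.Chars.find L k ≠ -1) :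
    ∃ m, pvMinHit L = some m ∧ m ∈ ((pvKwC.map (fun k => PySem.Chars.find L k)).filter (fun p => p ≠ -1))
      ∧ m ≤ PySem.Chars.find L k := by
  have hmem : PySem.Chars.find L k
      ∈ ((pvKwC.map (fun k => PySem.Chars.find L k)).filter (fun p => p ≠ -1)) :=
    List.mem_filter.mpr ⟨List.mem_map.mpr ⟨k, hkmem, rfl⟩, by simpa using hkne⟩
  cases hmin : PySem.List.min? ((pvKwC.map (fun k => PySem.Chars.find L k)).filter (fun p => p ≠ -1)) id with
  | none =>
    rw [pvMin?_none_iff] at hmin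
    rw [hmin] at hmem
    simp at hmem
  | some m =>
    exact ⟨m, hmin, pvMin?_mem _ m hmin, PySem.List.min?_isMin hmin _ hmem⟩

theorem pvMinHit_none (L : List Char) (hall : ∀ k ∈ pvKwC, PySem.Chars.find L k = -1) :
    pvMinHit L = none := by
  unfold pvMinHit
  rw [pvMin?_none_iff, List.filter_eq_nil_iff]
  intro p hpmem
  rcases List.mem_map.mp hpmem with ⟨k, hkmem, rfl⟩
  simp [hall k hkmem]

theorem pvMainNoNl (S : List Char) (h : '\n' ∉ S) : pvAOutC S = pvBOutC S := by
  have hL : '\n' ∉ PySem.Chars.lower S := fun hm => h ((pvMemLower S).mp hm)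
  unfold pvAOutC pvBOutC
  rw [pvSplitOn_noNl S h]
  by_cases hp : pvHitC S
  · obtain ⟨k, hkmem, hkin⟩ := List.any_eq_true.mp hp
    have hkne : PySem.Chars.find (PySem.Chars.lower S) k ≠ -1 := by
      intro heq
      exact (PySem.Chars.find_eq_neg_one_iff _ k).mp heq
        ((PySem.Chars.isIn_iff_infix k _).mp hkin)
    obtain ⟨m, hm, hmmem, _⟩ := pvMinHit_some (PySem.Chars.lower S) k hkmem hkne
    rw [hm]
    have hm0 : 0 ≤ m := pvHits_nonneg _ _ _ hmmem
    have htk : '\n' ∉ (PySem.Chars.lower S).take m.toNat :=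
      fun hmem => hL (List.take_subset _ _ hmem)
    simp [pvFindRestC, hp, PySem.Chars.join_singleton, pvRfind_no _ htk]
  · have hall : ∀ k ∈ pvKwC, PySem.Chars.find (PySem.Chars.lower S) k = -1 := by
      intro k hkmem
      rw [PySem.Chars.find_eq_neg_one_iff]
      intro hinf
      exact hp (List.any_eq_true.mpr ⟨k, hkmem, (PySem.Chars.isIn_iff_infix k _).mpr hinf⟩)
    rw [pvMinHit_none _ hall]
    simp [pvFindRestC, hp]

theorem pvMainAux : ∀ (n : Nat) (S : List Char), S.length ≤ n → pvAOutC S = pvBOutC S := by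
  intro n
  induction n with
  | zero =>
    intro S hlen
    have hS : S = [] := List.eq_nil_of_length_eq_zero (by omega)
    subst hS
    exact pvMainNoNl [] (by simp)
  | succ n ih =>
    intro S hlen
    by_cases h : '\n' ∈ S
    · obtain ⟨H, T, rfl, hH⟩ := pvFirstSplit S h
      have hlenT : T.length ≤ n := by simp at hlen; omega
      have hLsplit : PySem.Chars.lower (H ++ '\n' :: T)
          = PySem.Chars.lower H ++ '\n' :: PySem.Chars.lower T := by
        rw [pvLower_append, pvLower_cons_nl]
      have hHL : '\n' ∉ PySem.Chars.lower H := fun hm => hH ((pvMemLower H).mp hm)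
      by_cases hp : pvHitC H
      · -- both sides return the whole string
        have hA : pvAOutC (H ++ '\n' :: T) = some (H ++ '\n' :: T) := by
          unfold pvAOutC
          rw [pvSplitOn_cons H T hH]
          cases hsp : PySem.Chars.splitOn T pvNl with
          | nil => exact absurd hsp (pvSplitOn_ne_nil T)
          | cons l0 ls =>
            have hT := pvJoinSplit T
            rw [hsp] at hT
            simp only [pvFindRestC, hp, if_true, Option.map_some]
            rw [PySem.Chars.join_cons_cons, hT]
            simp [pvNl]
        have hB : pvBOutC (H ++ '\n' :: T) = some (H ++ '\n' :: T) := by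
          unfold pvBOutC
          obtain ⟨k, hkmem, hkin⟩ := List.any_eq_true.mp hp
          obtain ⟨hkne, hknl⟩ := pvKwC_fact k hkmem
          have hbound := pvFind_lt_of_infix (PySem.Chars.lower H) ('\n' :: PySem.Chars.lower T) k
            hkne ((PySem.Chars.isIn_iff_infix _ _).mp hkin)
          rw [← hLsplit] at hbound
          have hkne2 : PySem.Chars.find (PySem.Chars.lower (H ++ '\n' :: T)) k ≠ -1 := by omega
          obtain ⟨m, hm, hmmem, hmle⟩ := pvMinHit_some _ k hkmem hkne2
          rw [hm]
          have hm0 : 0 ≤ m := pvHits_nonneg _ _ _ hmmem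
          have hlh : (PySem.Chars.lower H).length = H.length := pvLower_length H
          have hmlt : m.toNat < H.length := by
            have h2 := hbound.2
            omega
          have htake : (PySem.Chars.lower (H ++ '\n' :: T)).take m.toNat
              = (PySem.Chars.lower H).take m.toNat := by
            rw [hLsplit, List.take_append, Nat.sub_eq_zero_of_le (by omega), List.take_zero,
              List.append_nil]

          have htk : '\n' ∉ (PySem.Chars.lower (H ++ '\n' :: T)).take m.toNat := by
            rw [htake]
            exact fun hmem => hHL (List.take_subset _ _ hmem)
          simp [pvRfind_no _ htk]
        rw [hA, hB]
      · -- A and B both defer to T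
        have hA : pvAOutC (H ++ '\n' :: T) = pvAOutC T := by
          unfold pvAOutC
          rw [pvSplitOn_cons H T hH]
          simp [pvFindRestC, hp]
        have hnoinf : ∀ k ∈ pvKwC, ¬ k <:+: PySem.Chars.lower H := by
          intro k hkmem hinf
          exact hp (List.any_eq_true.mpr ⟨k, hkmem, (PySem.Chars.isIn_iff_infix k _).mpr hinf⟩)
        have hshift : ∀ k ∈ pvKwC, PySem.Chars.find (PySem.Chars.lower (H ++ '\n' :: T)) k
            = if PySem.Chars.find (PySem.Chars.lower T) k = -1 then -1
              else (((PySem.Chars.lower H).length : Int) + 1) + PySem.Chars.find (PySem.Chars.lower T) k := by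
          intro k hkmem
          obtain ⟨hkne, hknl⟩ := pvKwC_fact k hkmem
          rw [hLsplit]
          exact pvFindShift (PySem.Chars.lower H) (PySem.Chars.lower T) k hknl hkne (hnoinf k hkmem)
        have hmin : pvMinHit (PySem.Chars.lower (H ++ '\n' :: T))
            = (pvMinHit (PySem.Chars.lower T)).map
                (fun p => (((PySem.Chars.lower H).length : Int) + 1) + p) := by
          unfold pvMinHit
          rw [pvHits_shift pvKwC _ _ _ (by positivity) hshift, pvMin?_map_add]
        have hB : pvBOutC (H ++ '\n' :: T) = pvBOutC T := by
          unfold pvBOutC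
          rw [hmin]
          cases hmT : pvMinHit (PySem.Chars.lower T) with
          | none => simp
          | some p =>
            simp only [Option.map_some]
            have hp0 : 0 ≤ p := by
              have hpmem : p ∈ ((pvKwC.map (fun k => PySem.Chars.find (PySem.Chars.lower T) k)).filter (fun p => p ≠ -1)) :=
                pvMin?_mem _ p hmT
              exact pvHits_nonneg _ _ _ hpmem
            congr 1
            have hptn : ((((PySem.Chars.lower H).length : Int) + 1) + p).toNat
                = (PySem.Chars.lower H).length + 1 + p.toNat := by omega
            rw [hLsplit, hptn]
            have htake : (PySem.Chars.lower H ++ '\n' :: PySem.Chars.lower T).take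
                  ((PySem.Chars.lower H).length + 1 + p.toNat)
                = PySem.Chars.lower H ++ '\n' :: (PySem.Chars.lower T).take p.toNat := by
              rw [List.take_append]
              congr 1
              · exact List.take_of_length_le (by omega)
              · have harith : (PySem.Chars.lower H).length + 1 + p.toNat - (PySem.Chars.lower H).length
                    = p.toNat + 1 := by omega
                rw [harith, List.take_succ_cons]
            rw [htake, pvRfind_append _ _ hHL]
            have hr := pvRfind_ge ((PySem.Chars.lower T).take p.toNat)
            have hdn : (((PySem.Chars.lower H).length : Int) + 1
                  + PySem.Chars.rfind ((PySem.Chars.lower T).take p.toNat) pvNl + 1).toNat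
                = H.length + 1 + (PySem.Chars.rfind ((PySem.Chars.lower T).take p.toNat) pvNl + 1).toNat := by
              rw [pvLower_length]
              omega
            rw [hdn]
            rw [List.drop_append]
            have h1 : H.drop (H.length + 1 + (PySem.Chars.rfind ((PySem.Chars.lower T).take p.toNat) pvNl + 1).toNat) = [] :=
              List.drop_eq_nil_of_le (by omega)
            have h2 : H.length + 1 + (PySem.Chars.rfind ((PySem.Chars.lower T).take p.toNat) pvNl + 1).toNat - H.length
                = (PySem.Chars.rfind ((PySem.Chars.lower T).take p.toNat) pvNl + 1).toNat + 1 := by omega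
            rw [h1, h2, List.drop_succ_cons, List.nil_append]
        rw [hA, hB]
        exact ih T hlenT
    · exact pvMainNoNl S h

theorem pvMain (S : List Char) : pvAOutC S = pvBOutC S :=
  pvMainAux S.length S le_rfl

-- ---- bridges String ↔ List Char ----

theorem pvHitA_ofList (l : List Char) : pvHitA (String.ofList l) = pvHitC l := by
  simp [pvHitA, pvHitC, pvKwC, pvKeywords]

theorem pvFindRestS_map (ls : List (List Char)) :
    pvFindRestS (ls.map String.ofList) = (pvFindRestC ls).map (List.map String.ofList) := by
  induction ls with
  | nil => simp [pvFindRestS, pvFindRestC]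
  | cons l ls ih =>
    simp only [List.map_cons, pvFindRestS, pvFindRestC, pvHitA_ofList l]
    by_cases hp : pvHitC l
    · simp [hp]
    · simp [hp, ih]

theorem pvRfindFrom_take (L : List Char) (m : Int) (h0 : 0 ≤ m) (hle : m ≤ (L.length : Int)) :
    PySem.Chars.rfindFrom L pvNl 0 (some m) + 1
      = PySem.Chars.rfind (L.take m.toNat) pvNl + 1 := by
  unfold PySem.Chars.rfindFrom
  simp only
  split_ifs <;> simp only [Int.toNat_zero, List.drop_zero] at * <;> omega

theorem pvStr_ext (a b : String) (h : a.toList = b.toList) : a = b := by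
  rw [← String.ofList_toList (s := a), ← String.ofList_toList (s := b), h]

theorem pvFindRestC_ne_nil (ls suffix : List (List Char)) (h : pvFindRestC ls = some suffix) :
    suffix ≠ [] := by
  induction ls with
  | nil => simp [pvFindRestC] at h
  | cons l ls ih =>
    simp only [pvFindRestC] at h
    split at h
    · cases h; simp
    · exact ih h

-- ===== VERDICT =====
theorem extract_outcomes_from_project_py_spec : Claim_equal_extract_outcomes_from_project_py := by
  unfold Claim_equal_extract_outcomes_from_project_py
  intro s _
  unfold Spec_extract_outcomes_from_project_py
  unfold extract_outcomes_from_project_py extract_outcomes_from_project_py_alt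
  by_cases hg : (PySem.Str.isIn "outcomes" (PySem.Str.lower s)
      || PySem.Str.isIn "results" (PySem.Str.lower s)) = true
  · simp only [hg, if_true]
    have hnl : ("\n" : String).toList = ['\n'] := by decide
    have hsplit : (PySem.Str.split? s "\n").getD []
        = (PySem.Chars.splitOn s.toList pvNl).map String.ofList := by
      rw [PySem.Str.split?, PySem.Chars.split?, hnl]
      simp [pvNl]
    rw [hsplit, pvFoldlA_false, pvFindRestS_map]
    have hhits : ((pvKeywords.map (fun k => PySem.Str.find (PySem.Str.lower s) k)).filter
          (fun p => p ≠ -1))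
        = ((pvKwC.map (fun k => PySem.Chars.find (PySem.Chars.lower s.toList) k)).filter
          (fun p => p ≠ -1)) := by
      simp [pvKwC, List.map_map, Function.comp_def]
    rw [hhits]
    have hmain := pvMain s.toList
    unfold pvAOutC pvBOutC at hmain
    cases hfr : pvFindRestC (PySem.Chars.splitOn s.toList pvNl) with
    | none =>
      rw [hfr] at hmain
      simp only [Option.map_none] at hmain
      cases hmh : pvMinHit (PySem.Chars.lower s.toList) with
      | some m => rw [hmh] at hmain; simp at hmain
      | none =>
        unfold pvMinHit at hmh
        rw [hmh]
        simp
    | some suf =>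
      rw [hfr] at hmain
      simp only [Option.map_some] at hmain
      cases hmh : pvMinHit (PySem.Chars.lower s.toList) with
      | none => rw [hmh] at hmain; simp at hmain
      | some m =>
        rw [hmh] at hmain
        simp only [Option.some.injEq] at hmain
        have hmh' := hmh
        unfold pvMinHit at hmh'
        rw [hmh']
        have hsufne : suf ≠ [] := pvFindRestC_ne_nil _ suf hfr
        rw [if_pos (by simpa using hsufne)]
        simp only [Option.map_some, List.nil_append]
        -- both sides are now concrete strings; compare their character lists
        have hmem := pvMin?_mem _ m hmh'
        have hm0 : 0 ≤ m := pvHits_nonneg _ _ _ hmem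
        have hmlen : m ≤ ((PySem.Chars.lower s.toList).length : Int) := pvHits_le_len _ _ _ hmem
        apply pvStr_ext
        rw [PySem.Str.toList_join, hnl]
        have hsuf : (suf.map String.ofList).map String.toList = suf := by
          simp [Function.comp_def]
        rw [hsuf]
        have hr1 : PySem.Str.rfindFrom (PySem.Str.lower s) "\n" 0 (some m) + 1
            = PySem.Chars.rfind ((PySem.Chars.lower s.toList).take m.toNat) pvNl + 1 := by
          rw [PySem.Str.rfindFrom_eq, PySem.Str.toList_lower, hnl]
          exact pvRfindFrom_take _ m hm0 hmlen
        have hge : (0:Int) ≤ PySem.Chars.rfind ((PySem.Chars.lower s.toList).take m.toNat) pvNl + 1 := by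
          have := pvRfind_ge ((PySem.Chars.lower s.toList).take m.toNat)
          omega
        rw [hr1, PySem.Str.toList_slice, PySem.Chars.slice_eq_listSlice,
          PySem.List.slice_from _ hge]
        exact hmain
  · simp only [Bool.not_eq_true] at hg
    simp only [hg, Bool.false_eq_true, if_false]
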